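-- pv_equiv track=rewrite | github.com/ynikitenko/lena | lena/core/split.py | _get_uc_intersection
-- ===== SOURCE A (Python) =====
-- import collections
--
-- def _get_uc_intersection(unknown_contexts_seq):
--     from copy import copy as copy_
--     # deque to preserve the order, and because it may be faster
--     # to delete elements from start (if all sequences are different)
--     intersection = collections.deque(unknown_contexts_seq[0])
--
--     def remove_from_deque(ucs, context):
--         # index does not help in deque, it's O(n) (or maybe not at 0?)
--         # https://stackoverflow.com/questions/58152201/time-complexity-deleting-element-of-deque
--         while True:
--             try:
--                 ucs.remove(context)
--             except ValueError:
--                 break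
--
--     for unknown_contexts in unknown_contexts_seq[1:]:
--         # we can't iterate a mutated deque
--         for context in copy_(intersection):
--             remove = False
--             if context not in unknown_contexts:
--                 remove = True
--                 # todo: if a local (known) context sets the same key,
--                 # the result will be different (no intersection here!)
--                 # Also need to check cardinality
--                 # and other unknown contexts setting the same key.
--                 # we could have several copies of this context
--             # elif ...
--             if remove:
--                 remove_from_deque(intersection, context)
--
--     return list(intersection)
-- ===== SOURCE B (Python) =====
-- def _get_uc_intersection(unknown_contexts_seq):
--     first, rest = unknown_contexts_seq[0], unknown_contexts_seq[1:]
--     return [c for c in first if all(c in s for s in rest)]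
-- ===== Notes on version B (the rewrite author's own statement) =====
-- stated objective: simpler
-- what changed: Replaces the mutable shrinking deque with repeated remove-until-ValueError passes and snapshot copies by a single comprehension over the first sequence keeping elements that are members of every later sequence; no mutation at all.
import Mathlib
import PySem

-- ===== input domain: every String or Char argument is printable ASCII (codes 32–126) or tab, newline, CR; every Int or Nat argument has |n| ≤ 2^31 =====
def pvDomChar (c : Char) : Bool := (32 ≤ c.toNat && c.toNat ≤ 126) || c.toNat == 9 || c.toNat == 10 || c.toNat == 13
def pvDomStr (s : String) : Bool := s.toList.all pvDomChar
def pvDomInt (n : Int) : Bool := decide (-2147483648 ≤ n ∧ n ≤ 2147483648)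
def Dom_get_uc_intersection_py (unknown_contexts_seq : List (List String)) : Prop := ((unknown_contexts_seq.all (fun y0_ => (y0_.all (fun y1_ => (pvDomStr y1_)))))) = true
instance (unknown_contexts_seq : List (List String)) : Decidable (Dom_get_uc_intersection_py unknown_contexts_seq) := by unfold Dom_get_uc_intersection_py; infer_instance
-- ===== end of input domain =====

-- B replaces A's mutable deque with repeated remove-until-ValueError passes by a
-- single filter over the first sequence keeping members of every later sequence (simpler).
-- ===== PORT A =====
-- termination helper for the remove-until-ValueError loop
theorem pv_remove?_length_lt {xs ys : List String} {v : String}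
    (h : PySem.List.remove? xs v = some ys) : ys.length < xs.length := by
  have hv : v ∈ xs := by
    by_contra hnv
    simp [(PySem.List.remove?_eq_none_iff xs v).mpr hnv] at h
  rw [PySem.List.remove?_eq_some_erase xs v hv] at h
  injection h with h'
  subst h'
  have h1 := List.length_erase_of_mem hv
  have h2 := List.length_pos_of_mem hv
  omega

-- 'while True: try: ucs.remove(context) except ValueError: break'
def remove_from_deque (ucs : List String) (context : String) : List String :=
  match h : PySem.List.remove? ucs context with
  | none => ucs
  | some ucs' => remove_from_deque ucs' context
termination_by ucs.length
decreasing_by exact pv_remove?_length_lt h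

def get_uc_intersection_py (unknown_contexts_seq : List (List String)) : List String :=
  match unknown_contexts_seq with
  | [] => []  -- unreachable under Pre_: Python raises IndexError on seq[0]
  | first :: rest =>
    rest.foldl (fun intersection unknown_contexts =>
      -- 'for context in copy_(intersection)': iterate the snapshot, mutate the accumulator
      intersection.foldl (fun inter context =>
        let remove := !(unknown_contexts.contains context)
        if remove then remove_from_deque inter context else inter) intersection) first

-- ===== PORT B =====
def get_uc_intersection_py_alt (unknown_contexts_seq : List (List String)) : List String :=
  match unknown_contexts_seq with
  | [] => []  -- unreachable under Pre_
  | first :: rest =>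
    first.filter (fun c => rest.all (fun s => s.contains c))

-- ===== PRECONDITION & SPEC =====
-- A raises IndexError on the empty sequence (unknown_contexts_seq[0]); B raises there too.
def Pre_get_uc_intersection_py (unknown_contexts_seq : List (List String)) : Prop :=
  unknown_contexts_seq ≠ []
instance (unknown_contexts_seq : List (List String)) : Decidable (Pre_get_uc_intersection_py unknown_contexts_seq) := by
  unfold Pre_get_uc_intersection_py; infer_instance
def pvWitness_get_uc_intersection_py : List (List String) := [["a", "b", "a"], ["b", "a"]]
def Spec_get_uc_intersection_py (unknown_contexts_seq : List (List String)) (out : List String) : Prop := out = get_uc_intersection_py_alt unknown_contexts_seq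
instance (unknown_contexts_seq : List (List String)) (out : List String) : Decidable (Spec_get_uc_intersection_py unknown_contexts_seq out) := by unfold Spec_get_uc_intersection_py; infer_instance

-- ===== CLAIM (what is proved, stated in full; the proofs are below) =====
def Claim_equal_get_uc_intersection_py : Prop := ∀ (unknown_contexts_seq : List (List String)), Dom_get_uc_intersection_py unknown_contexts_seq → Pre_get_uc_intersection_py unknown_contexts_seq → Spec_get_uc_intersection_py unknown_contexts_seq (get_uc_intersection_py unknown_contexts_seq)

-- ===== LEMMAS AND PROOFS =====

theorem filter_ne_erase (xs : List String) (c : String) :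
    (xs.erase c).filter (fun x => x ≠ c) = xs.filter (fun x => x ≠ c) := by
  induction xs with
  | nil => simp
  | cons x xs ih =>
    rw [List.erase_cons]
    by_cases hx : x = c
    · subst hx; simp
    · simp only [beq_iff_eq, hx, ite_false, List.filter_cons, decide_eq_true_eq]
      rw [if_pos hx, if_pos hx, ih]

theorem remove_from_deque_eq_filter (ucs : List String) (c : String) :
    remove_from_deque ucs c = ucs.filter (fun x => x ≠ c) := by
  rw [remove_from_deque]
  split
  · next h =>
    have hnc : c ∉ ucs := (PySem.List.remove?_eq_none_iff ucs c).mp h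
    symm
    apply List.filter_eq_self.mpr
    intro a ha
    simp only [decide_eq_true_eq]
    exact fun hac => hnc (hac ▸ ha)
  · next ys h =>
    have hv : c ∈ ucs := by
      by_contra hnv
      simp [(PySem.List.remove?_eq_none_iff ucs c).mpr hnv] at h
    have hys : ys = ucs.erase c := by
      rw [PySem.List.remove?_eq_some_erase ucs c hv] at h
      exact (Option.some.inj h).symm
    rw [remove_from_deque_eq_filter ys c, hys, filter_ne_erase]
termination_by ucs.length
decreasing_by exact pv_remove?_length_lt (by assumption)

-- one pass of A's inner Python loop equals a filter
theorem inner_loop_eq (ucs : List String) (l s : List String) :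
    l.foldl (fun inter context =>
        let remove := !(ucs.contains context)
        if remove then remove_from_deque inter context else inter) s
      = s.filter (fun x => !l.contains x || ucs.contains x) := by
  induction l generalizing s with
  | nil => simp
  | cons c l' ih =>
    simp only [List.foldl_cons]
    by_cases hc : ucs.contains c = true
    · simp only [hc, Bool.not_true, Bool.false_eq_true, if_false]
      rw [ih]
      apply List.filter_congr
      intro x _
      by_cases hxc : x = c
      · subst hxc; simp_all
      · simp [hxc]
    · simp only [Bool.not_eq_true] at hc
      simp only [hc, Bool.not_false, if_true]
      rw [ih, remove_from_deque_eq_filter, List.filter_filter]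
      apply List.filter_congr
      intro x _
      by_cases hxc : x = c
      · subst hxc; simp_all
      · simp [hxc]

theorem outer_loop_eq (rest : List (List String)) (first : List String) :
    rest.foldl (fun intersection unknown_contexts =>
        intersection.foldl (fun inter context =>
          let remove := !(unknown_contexts.contains context)
          if remove then remove_from_deque inter context else inter) intersection) first
      = first.filter (fun c => rest.all (fun s => s.contains c)) := by
  induction rest generalizing first with
  | nil => simp
  | cons u rest' ih =>
    simp only [List.foldl_cons]
    rw [inner_loop_eq]
    have hstep : first.filter (fun x => !first.contains x || u.contains x)
        = first.filter (fun x => u.contains x) := by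
      apply List.filter_congr
      intro x hx
      simp
      exact fun h => absurd hx h
    rw [hstep, ih, List.filter_filter]
    apply List.filter_congr
    intro x _
    simp [Bool.and_comm]

-- ===== VERDICT (by name: the statement is the Claim_ definition above) =====
theorem get_uc_intersection_py_spec : Claim_equal_get_uc_intersection_py := by
  intro seq _ hpre
  unfold Spec_get_uc_intersection_py
  match seq with
  | [] => exact absurd rfl hpre
  | first :: rest =>
    show get_uc_intersection_py (first :: rest) = get_uc_intersection_py_alt (first :: rest)
    unfold get_uc_intersection_py get_uc_intersection_py_alt
    exact outer_loop_eq rest first
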